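-- pv_equiv track=rewrite | github.com/bumsikki/coding_test_prep | 프로그래머스/lv2/17677. ［1차］ 뉴스 클러스터링/［1차］ 뉴스 클러스터링.py | group_setup
-- ===== SOURCE A (Python) =====
-- def group_setup(A):
--     result = []
--     for i in range(len(A)-1):
--         if not A[i].isalpha() or not A[i+1].isalpha():
--             continue
--         else:
--             result.append(A[i:i+2].lower())
--     return result
-- ===== SOURCE B (Python) =====
-- def group_setup(A):
--     # Partition A into maximal alphabetic runs (lowercased as we go), and
--     # emit each run's consecutive 2-grams; a non-alphabetic sentinel flushes the last run.
--     bigrams = []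
--     run = []
--     for ch in A + ' ':
--         if ch.isalpha():
--             run.append(ch.lower())
--         else:
--             bigrams += [a + b for a, b in zip(run, run[1:])]
--             run = []
--     return bigrams
-- ===== Notes on version B (the rewrite author's own statement) =====
-- stated objective: alternative
-- what changed: Instead of indexing every adjacent position and re-testing both characters with slicing, B streams the string once, accumulating maximal alphabetic runs (lowercased on entry) and emitting each run's consecutive 2-grams via zip when the run ends.
import Mathlib
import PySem

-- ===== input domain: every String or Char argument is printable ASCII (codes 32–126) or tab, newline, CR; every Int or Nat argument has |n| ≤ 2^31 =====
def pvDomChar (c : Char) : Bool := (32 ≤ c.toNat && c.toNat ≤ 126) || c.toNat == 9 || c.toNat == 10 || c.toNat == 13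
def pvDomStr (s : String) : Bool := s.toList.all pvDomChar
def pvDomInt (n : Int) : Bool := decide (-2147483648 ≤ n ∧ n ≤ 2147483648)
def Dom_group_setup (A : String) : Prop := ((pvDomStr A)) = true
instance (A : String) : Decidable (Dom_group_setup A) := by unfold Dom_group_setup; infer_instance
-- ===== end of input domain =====

-- B replaces A's per-index adjacency test with a single pass that collects maximal
-- alphabetic runs (lowercased) and emits each run's consecutive 2-grams (objective: alternative).


-- ===== PORT A =====
-- Loop body of A: 'if not A[i].isalpha() or not A[i+1].isalpha(): continue else: result.append(A[i:i+2].lower())'.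
-- Every i drawn from range(len(A)-1) has i and i+1 in range, so the default of pyGetD is never used (totality guard only).
def bodyA (l : List Char) (result : List String) (i : Int) : List String :=
  if !(PySem.Chars.isalpha (PySem.List.pyGetD l i ' ')) ||
     !(PySem.Chars.isalpha (PySem.List.pyGetD l (i + 1) ' ')) then
    result
  else
    result ++ [String.ofList (PySem.Chars.lower (PySem.List.slice l (some i) (some (i + 2))))]

def group_setup (A : String) : List String :=
  (PySem.List.pyRange 0 ((A.toList.length : Int) - 1)).foldl (bodyA A.toList) []

-- ===== PORT B =====
-- '[a + b for a, b in zip(run, run[1:])]'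
def emitRun (run : List Char) : List String :=
  (run.zip run.tail).map (fun p => String.ofList [p.1, p.2])

-- loop body of B: grow the lowercased run on a letter, otherwise flush its 2-grams
def stepB (st : List String × List Char) (ch : Char) : List String × List Char :=
  if PySem.Chars.isalpha ch then (st.1, st.2 ++ [PySem.Chars.lowerChar ch])
  else (st.1 ++ emitRun st.2, [])

def group_setup_alt (A : String) : List String :=
  ((A.toList ++ [' ']).foldl stepB ([], [])).1

-- ===== PRECONDITION & SPEC =====
def Spec_group_setup (A : String) (out : List String) : Prop := out = group_setup_alt A
instance (A : String) (out : List String) : Decidable (Spec_group_setup A out) := by unfold Spec_group_setup; infer_instance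

-- ===== CLAIM (what is proved, stated in full; the proofs are below) =====
def Claim_equal_group_setup : Prop := ∀ (A : String), Dom_group_setup A → Spec_group_setup A (group_setup A)

-- ===== LEMMAS AND PROOFS =====

-- Common characterization: the lowered 2-gram at each pair of adjacent alphabetic characters.
def specA : List Char → List String
  | a :: b :: t =>
      (if PySem.Chars.isalpha a && PySem.Chars.isalpha b
       then [String.ofList [PySem.Chars.lowerChar a, PySem.Chars.lowerChar b]] else [])
      ++ specA (b :: t)
  | _ => []

theorem specA_short (l : List Char) (h : l.length ≤ 1) : specA l = [] := by
  match l with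
  | [] => rfl
  | [_] => rfl
  | _ :: _ :: _ => simp at h

-- ---- A-side: the index fold computes specA ----
theorem A_loop (k : Nat) : ∀ (i : Nat) (l : List Char) (acc : List String),
    l.length - 1 - i ≤ k →
    (PySem.List.pyRange (i : Int) ((l.length : Int) - 1)).foldl (bodyA l) acc
      = acc ++ specA (l.drop i) := by
  induction k with
  | zero =>
    intro i l acc h
    have hle : (l.length : Int) - 1 ≤ (i : Int) := by omega
    rw [PySem.List.pyRange_one_eq_nil hle, List.foldl_nil,
        specA_short _ (by simp; omega), List.append_nil]
  | succ k ih =>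
    intro i l acc h
    by_cases hlt : (i : Int) < (l.length : Int) - 1
    · have hi1 : i + 1 < l.length := by omega
      have hi : i < l.length := by omega
      rw [PySem.List.pyRange_one_cons hlt, List.foldl_cons]
      have hdrop : l.drop i = l[i] :: l.drop (i + 1) := List.drop_eq_getElem_cons hi
      have hdrop1 : l.drop (i + 1) = l[i + 1] :: l.drop (i + 2) := List.drop_eq_getElem_cons hi1
      have hslice : PySem.List.slice l (some (i : Int)) (some ((i : Int) + 2))
          = [l[i], l[i + 1]] := by
        have : ((i : Int) + 2) = ((i + 2 : Nat) : Int) := by push_cast; ring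
        rw [this, PySem.List.slice_natCast]
        have : i + 2 - i = 2 := by omega
        rw [this, hdrop, hdrop1]
        rfl
      have hget : PySem.List.pyGetD l (i : Int) ' ' = l[i] := by
        rw [PySem.List.pyGetD_natCast, List.getD_eq_getElem l ' ' hi]
      have hget1 : PySem.List.pyGetD l ((i : Int) + 1) ' ' = l[i + 1] := by
        have : ((i : Int) + 1) = ((i + 1 : Nat) : Int) := by push_cast; ring
        rw [this, PySem.List.pyGetD_natCast, List.getD_eq_getElem l ' ' hi1]
      have hrec : ((i : Int) + 1) = ((i + 1 : Nat) : Int) := by push_cast; ring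
      rw [hrec, ih (i + 1) l _ (by omega), hdrop]
      rw [show specA (l[i] :: l.drop (i + 1))
            = (if PySem.Chars.isalpha l[i] && PySem.Chars.isalpha l[i + 1]
               then [String.ofList [PySem.Chars.lowerChar l[i], PySem.Chars.lowerChar l[i + 1]]] else [])
              ++ specA (l.drop (i + 1)) by rw [hdrop1]; rfl]
      unfold bodyA
      rw [hget, hget1, hslice]
      cases ha : PySem.Chars.isalpha l[i] <;> cases hb : PySem.Chars.isalpha l[i + 1] <;>
        simp [PySem.Chars.lower, List.append_assoc]
    · have hle : (l.length : Int) - 1 ≤ (i : Int) := by omega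
      rw [PySem.List.pyRange_one_eq_nil hle, List.foldl_nil,
          specA_short _ (by simp; omega), List.append_nil]

-- ---- B-side ----
-- what B's loop computes, as a recursion over the remaining characters with the pending lowered run
def gB : List Char → List Char → List String
  | run, [] => emitRun run
  | run, c :: t =>
      if PySem.Chars.isalpha c then gB (run ++ [PySem.Chars.lowerChar c]) t
      else emitRun run ++ gB [] t

theorem B_loop : ∀ (l : List Char) (res : List String) (run : List Char),
    ((l ++ [' ']).foldl stepB (res, run)).1 = res ++ gB run l := by
  intro l
  induction l with
  | nil =>
    intro res run
    simp [stepB, gB, show PySem.Chars.isalpha ' ' = false from rfl]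
  | cons c t ih =>
    intro res run
    by_cases hc : PySem.Chars.isalpha c = true
    · simp only [List.cons_append, List.foldl_cons, stepB, hc, if_true, gB, ih]
    · simp only [List.cons_append, List.foldl_cons, stepB, hc, gB, ih,
        Bool.not_eq_true] at *
      simp [List.append_assoc]

theorem emit_spec : ∀ (p : List Char), (∀ c ∈ p, PySem.Chars.isalpha c = true) →
    emitRun (p.map PySem.Chars.lowerChar) = specA p := by
  intro p
  induction p with
  | nil => intro _; rfl
  | cons a t ih =>
    intro h
    cases t with
    | nil => rfl
    | cons b t' =>
      have ha : PySem.Chars.isalpha a = true := h a (by simp)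
      have hb : PySem.Chars.isalpha b = true := h b (by simp)
      have := ih (fun c hc => h c (by simp [hc]))
      simp only [List.map_cons, emitRun, List.tail_cons, List.zip_cons_cons, List.map_cons] at *
      simp [specA, ha, hb, ← this]

theorem specA_cons_notalpha (c : Char) (t : List Char)
    (h : PySem.Chars.isalpha c = false) : specA (c :: t) = specA t := by
  cases t with
  | nil => rfl
  | cons b t' => simp [specA, h]

theorem specA_append_break : ∀ (p : List Char) (c : Char) (t : List Char),
    (∀ x ∈ p, PySem.Chars.isalpha x = true) → PySem.Chars.isalpha c = false →
    specA (p ++ c :: t) = specA p ++ specA (c :: t) := by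
  intro p
  induction p with
  | nil => intro c t _ _; rfl
  | cons a p' ih =>
    intro c t hp hc
    cases p' with
    | nil =>
      simp only [List.cons_append, List.nil_append]
      rw [show specA (a :: c :: t)
            = (if PySem.Chars.isalpha a && PySem.Chars.isalpha c
               then [String.ofList [PySem.Chars.lowerChar a, PySem.Chars.lowerChar c]] else [])
              ++ specA (c :: t) from rfl]
      simp [hc, specA]
    | cons b p'' =>
      have := ih c t (fun x hx => hp x (by simp [hx])) hc
      simp only [List.cons_append] at *
      rw [show specA (a :: b :: (p'' ++ c :: t))
            = (if PySem.Chars.isalpha a && PySem.Chars.isalpha b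
               then [String.ofList [PySem.Chars.lowerChar a, PySem.Chars.lowerChar b]] else [])
              ++ specA (b :: (p'' ++ c :: t)) from rfl, this]
      simp [specA, List.append_assoc]

theorem gB_spec : ∀ (l p : List Char), (∀ c ∈ p, PySem.Chars.isalpha c = true) →
    gB (p.map PySem.Chars.lowerChar) l = specA (p ++ l) := by
  intro l
  induction l with
  | nil => intro p hp; simpa [gB] using emit_spec p hp
  | cons c t ih =>
    intro p hp
    by_cases hc : PySem.Chars.isalpha c = true
    · have hp' : ∀ x ∈ p ++ [c], PySem.Chars.isalpha x = true := by
        intro x hx; rcases List.mem_append.1 hx with h | h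
        · exact hp x h
        · simp at h; subst h; exact hc
      have := ih (p ++ [c]) hp'
      simp only [List.map_append, List.map_cons, List.map_nil] at this
      simp only [gB, hc, if_true]
      rw [this, List.append_assoc]; rfl
    · have hc' : PySem.Chars.isalpha c = false := by simpa using hc
      simp only [gB, hc', if_false, Bool.false_eq_true]
      have h0 := ih [] (by simp)
      simp only [List.map_nil, List.nil_append] at h0
      rw [emit_spec p hp, h0, specA_append_break p c t hp hc']
      simp [specA_cons_notalpha c t hc']

-- ===== VERDICT (by name: the statement is the Claim_ definition above) =====
theorem group_setup_spec : Claim_equal_group_setup := by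
  intro A _
  unfold Spec_group_setup group_setup group_setup_alt
  have hA := A_loop (A.toList.length) 0 A.toList [] (by omega)
  simp only [Nat.cast_zero, List.drop_zero, List.nil_append] at hA
  rw [hA, B_loop A.toList [] []]
  have := gB_spec A.toList [] (by simp)
  simp only [List.map_nil, List.nil_append] at this ⊢
  rw [this]
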